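-- pv_equiv track=rewrite | github.com/dayeon2423004/chess-pygame | game/utils.py | mouse_pos
-- ===== SOURCE A (Python) =====
-- def mouse_pos(mouse_x, mouse_y):
--     y_pos = 50
--     for y in range(1, 9):
--         if y != 1:
--             y_pos += 100
--         for x in range(1, 9):
--             if x == 1:
--                 x_pos = 50
--             else:
--                 x_pos += 100
--             if x_pos <= mouse_x < x_pos + 100 and y_pos <= mouse_y < y_pos + 100:
--                 return (x, y)
-- ===== SOURCE B (Python) =====
-- def mouse_pos(mouse_x, mouse_y):
--     if 50 <= mouse_x < 850 and 50 <= mouse_y < 850: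
--         return (int((mouse_x - 50) // 100) + 1, int((mouse_y - 50) // 100) + 1)
--     return None
-- ===== Notes on version B (the rewrite author's own statement) =====
-- stated objective: simpler
-- what changed: Replaced the 64-iteration nested grid scan with a bounds guard and a direct floor-division closed form for the cell indices.
import Mathlib
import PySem

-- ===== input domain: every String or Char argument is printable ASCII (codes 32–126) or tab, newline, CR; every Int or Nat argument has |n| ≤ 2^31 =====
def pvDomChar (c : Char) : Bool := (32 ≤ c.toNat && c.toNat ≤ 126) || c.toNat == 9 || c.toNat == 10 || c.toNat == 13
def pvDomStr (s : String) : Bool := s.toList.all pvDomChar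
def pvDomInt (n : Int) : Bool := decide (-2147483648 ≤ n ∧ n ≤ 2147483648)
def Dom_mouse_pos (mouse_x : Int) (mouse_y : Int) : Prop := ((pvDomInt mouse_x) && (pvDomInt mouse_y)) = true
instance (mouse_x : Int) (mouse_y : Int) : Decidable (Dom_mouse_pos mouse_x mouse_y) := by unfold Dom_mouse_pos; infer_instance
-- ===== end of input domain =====

-- B replaces A's 64-iteration nested grid scan with a bounds guard and a closed-form
-- floor-division cell computation (objective: simpler).
-- ===== PORT A =====
-- inner loop: for x in range(1,9), carrying the x_pos accumulator
def mpInner (mouse_x : Int) (mouse_y : Int) (y : Int) (y_pos : Int) : List Int → Int → Option (Int × Int)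
  | [], _ => none
  | x :: xs, x_pos =>
    let x_pos' := if x = 1 then 50 else x_pos + 100
    if x_pos' ≤ mouse_x ∧ mouse_x < x_pos' + 100 ∧ y_pos ≤ mouse_y ∧ mouse_y < y_pos + 100 then
      some (x, y)
    else
      mpInner mouse_x mouse_y y y_pos xs x_pos'

-- early 'return' of the inner loop: keep its result if any, otherwise continue
def orRet (o : Option (Int × Int)) (k : Option (Int × Int)) : Option (Int × Int) :=
  match o with
  | some r => some r
  | none => k

-- outer loop: for y in range(1,9), carrying the y_pos accumulator
def mpOuter (mouse_x : Int) (mouse_y : Int) : List Int → Int → Option (Int × Int)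
  | [], _ => none
  | y :: ys, y_pos =>
    let y_pos' := if y ≠ 1 then y_pos + 100 else y_pos
    orRet (mpInner mouse_x mouse_y y y_pos' (PySem.List.pyRange 1 9 1) 0)
          (mpOuter mouse_x mouse_y ys y_pos')

def mouse_pos (mouse_x : Int) (mouse_y : Int) : Option (Int × Int) :=
  mpOuter mouse_x mouse_y (PySem.List.pyRange 1 9 1) 50

-- ===== PORT B =====
def mouse_pos_alt (mouse_x : Int) (mouse_y : Int) : Option (Int × Int) :=
  if 50 ≤ mouse_x ∧ mouse_x < 850 ∧ 50 ≤ mouse_y ∧ mouse_y < 850 then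
    some (PySem.Int.floordiv (mouse_x - 50) 100 + 1, PySem.Int.floordiv (mouse_y - 50) 100 + 1)
  else
    none

-- ===== PRECONDITION & SPEC =====
def Spec_mouse_pos (mouse_x : Int) (mouse_y : Int) (out : Option (Int × Int)) : Prop := out = mouse_pos_alt mouse_x mouse_y
instance (mouse_x : Int) (mouse_y : Int) (out : Option (Int × Int)) : Decidable (Spec_mouse_pos mouse_x mouse_y out) := by unfold Spec_mouse_pos; infer_instance

-- ===== CLAIM (what is proved, stated in full; the proofs are below) =====
def Claim_equal_mouse_pos : Prop := ∀ (mouse_x : Int) (mouse_y : Int), Dom_mouse_pos mouse_x mouse_y → Spec_mouse_pos mouse_x mouse_y (mouse_pos mouse_x mouse_y)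

-- ===== LEMMAS AND PROOFS =====

-- ===== VERDICT (by name: the statement is the Claim_ definition above) =====
theorem orRet_if (c : Prop) [Decidable c] (v : Int × Int) (k : Option (Int × Int)) :
    orRet (if c then some v else none) k = if c then some v else k := by
  unfold orRet; split_ifs <;> rfl

set_option maxHeartbeats 1000000 in
-- one row of A's inner loop, in closed form
theorem mpInner_eq (mx my y yp : Int) :
    mpInner mx my y yp [1,2,3,4,5,6,7,8] 0 =
      (if 50 ≤ mx ∧ mx < 850 ∧ yp ≤ my ∧ my < yp + 100 then
        some ((mx - 50) / 100 + 1, y) else none) := by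
  simp only [mpInner]
  norm_num
  split_ifs <;> simp_all <;> omega

set_option maxHeartbeats 1000000 in
theorem mouse_pos_spec : Claim_equal_mouse_pos := by
  intro mx my _
  unfold Spec_mouse_pos mouse_pos mouse_pos_alt
  rw [show PySem.Int.floordiv (mx - 50) 100 = (mx - 50) / 100 from
        PySem.Int.floordiv_eq_ediv_of_pos (by norm_num),
      show PySem.Int.floordiv (my - 50) 100 = (my - 50) / 100 from
        PySem.Int.floordiv_eq_ediv_of_pos (by norm_num)]
  have hr : PySem.List.pyRange 1 9 1 = [1,2,3,4,5,6,7,8] := by decide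
  simp only [hr, mpOuter, mpInner_eq, orRet_if]
  norm_num
  split_ifs <;> simp_all <;> omega
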